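-- pv_equiv track=rewrite | github.com/rdpate/pyr | py3/pyr/optics.py | pos_int
-- ===== SOURCE A (Python) =====
-- class Exit(SystemExit):
--     """SystemExit with a specific code and a string message"""
--     def __init__(self, code, message=None):
--         """code is an integer or exit_codes key"""
--         if not isinstance(code, int):
--             code = exit_codes[code]
--         SystemExit.__init__(self, code)
--         self.message = message
--
-- def missing_value(name):
--     return Exit("usage", "missing value for option " + name)
--
-- def pos_int(name, value):
--     """allow positive base 10 integers"""
--     if not value:
--         raise missing_value(name)
--     if not all(c in "0123456789" for c in value):
--         raise Exit("usage", "expected positive integer for option " + name)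
--     value = int(value)
--     if value == 0:
--         raise Exit("usage", "expected positive integer for option " + name)
--     return value
-- ===== SOURCE B (Python) =====
-- class Exit(SystemExit):
--     """SystemExit with a specific code and a string message"""
--     def __init__(self, code, message=None):
--         """code is an integer or exit_codes key"""
--         if not isinstance(code, int):
--             code = exit_codes[code]
--         SystemExit.__init__(self, code)
--         self.message = message
--
-- def missing_value(name):
--     return Exit("usage", "missing value for option " + name)
--
-- def pos_int(name, value):
--     """allow positive base 10 integers"""
--     if not value:
--         raise missing_value(name)
--     if value.lstrip("0").isdigit():
--         return int(value)
--     raise Exit("usage", "expected positive integer for option " + name)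
-- ===== Notes on version B (the rewrite author's own statement) =====
-- stated objective: simpler
-- what changed: Instead of A's three staged checks (a per-character digit loop, int() conversion, then a == 0 test on the parsed number), B normalises the string once with lstrip('0') and decides everything with a single isdigit() test on the remainder (empty remainder = the zero case, a surviving non-digit = the invalid case), converting only on success.
import Mathlib
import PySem

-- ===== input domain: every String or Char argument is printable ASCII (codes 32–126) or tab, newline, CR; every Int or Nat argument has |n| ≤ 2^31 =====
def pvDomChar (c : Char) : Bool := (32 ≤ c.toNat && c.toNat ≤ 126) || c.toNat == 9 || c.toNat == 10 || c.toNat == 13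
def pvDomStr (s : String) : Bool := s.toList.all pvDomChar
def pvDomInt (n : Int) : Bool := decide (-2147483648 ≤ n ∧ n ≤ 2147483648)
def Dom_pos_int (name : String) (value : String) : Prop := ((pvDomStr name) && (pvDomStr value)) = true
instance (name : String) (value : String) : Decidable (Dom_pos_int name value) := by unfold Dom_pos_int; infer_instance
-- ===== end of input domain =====

-- B replaces A's three staged checks (per-character digit loop, int() conversion, == 0 test on the
-- parsed number) with one lstrip('0') normalisation plus a single isdigit() test; same return value
-- wherever A returns (the raising branches are outside Pre_).

-- ===== PORT A =====
-- port of: if not value: raise; if not all(c in "0123456789" for c in value): raise;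
--          value = int(value); if value == 0: raise; return value
-- (raising branches are outside Pre_ and return 0 here; 'c in "0123456789"' for the single
--  character c of the generator is membership in the digit characters)
def pos_int (name : String) (value : String) : Int :=
  if value.toList.isEmpty then 0      -- raise missing_value(name)
  else if !(value.toList.all (fun c => ("0123456789".toList).contains c)) then 0  -- raise Exit
  else
    match PySem.Int.ofStr? value with -- value = int(value) (never ValueError here: all digits)
    | none => 0
    | some v => if v = 0 then 0 else v  -- raise Exit when int(value) == 0

-- ===== PORT B =====
-- port of: if not value: raise; if value.lstrip("0").isdigit(): return int(value); raise Exit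
-- (value.lstrip("0") is ported by hand as dropWhile of membership in "0" — exact: str.lstrip(chars)
--  drops the longest prefix of characters occurring in chars)
def pos_int_alt (name : String) (value : String) : Int :=
  if value.toList.isEmpty then 0      -- raise missing_value(name)
  else
    let stripped := value.toList.dropWhile (fun c => ("0".toList).contains c)
    if PySem.Chars.strIsdigit stripped then
      (PySem.Int.ofStr? value).getD 0 -- return int(value) (never ValueError here)
    else 0                            -- raise Exit

-- ===== PRECONDITION & SPEC =====
-- Pre_ excludes exactly the inputs on which A raises (SystemExit): empty value, a character
-- that is not an ASCII digit, or a value consisting only of '0's (int(value) == 0).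
def Pre_pos_int (name : String) (value : String) : Prop :=
  value.toList ≠ [] ∧ (value.toList.all fun c => 48 ≤ c.toNat && c.toNat ≤ 57) = true
    ∧ (value.toList.any fun c => c.toNat != 48) = true
instance (name : String) (value : String) : Decidable (Pre_pos_int name value) := by
  unfold Pre_pos_int; infer_instance
def pvWitness_pos_int : String × String := ("-n", "007")

def Spec_pos_int (name : String) (value : String) (out : Int) : Prop := out = pos_int_alt name value
instance (name : String) (value : String) (out : Int) : Decidable (Spec_pos_int name value out) := by unfold Spec_pos_int; infer_instance

-- ===== CLAIM (what is proved, stated in full; the proofs are below) =====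
def Claim_equal_pos_int : Prop := ∀ (name : String) (value : String), Dom_pos_int name value → Pre_pos_int name value → Spec_pos_int name value (pos_int name value)

-- ===== LEMMAS AND PROOFS =====

lemma digits_toList : "0123456789".toList = ['0','1','2','3','4','5','6','7','8','9'] := by rfl

lemma mem_digits_iff (c : Char) : c ∈ "0123456789".toList ↔ (48 ≤ c.toNat ∧ c.toNat ≤ 57) := by
  rw [digits_toList]
  constructor
  · intro h
    fin_cases h <;> exact ⟨by decide, by decide⟩
  · rintro ⟨h1, h2⟩
    have hc : c = Char.ofNat c.toNat := (Char.ofNat_toNat c).symm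
    interval_cases h : c.toNat <;> (rw [hc]; decide)

-- ===== VERDICT (by name: the statement is the Claim_ definition above) =====
theorem pos_int_spec : Claim_equal_pos_int := by
  intro name value _hdom hpre
  obtain ⟨hne, hdigb, hexb⟩ := hpre
  have hdig : ∀ c ∈ value.toList, 48 ≤ c.toNat ∧ c.toNat ≤ 57 := by
    intro c hc
    have := List.all_eq_true.1 hdigb c hc
    simpa using this
  obtain ⟨c0, hc0m, hc0n⟩ := List.any_eq_true.1 hexb
  have hc0 : c0 ≠ '0' := by
    intro h; subst h; simp at hc0n
  unfold Spec_pos_int pos_int pos_int_alt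
  have hempty : value.toList.isEmpty = false := by simp [hne]
  have hall : value.toList.all (fun c => ("0123456789".toList).contains c) = true := by
    simp only [List.all_eq_true, List.contains_iff_mem]
    intro c hc
    exact (mem_digits_iff c).2 (hdig c hc)
  -- the stripped remainder is nonempty (the first non-'0' character survives) and all digits
  have hzl : ("0".toList : List Char) = ['0'] := by rfl
  have hstrip_ne : value.toList.dropWhile (fun c => ("0".toList).contains c) ≠ [] := by
    intro h
    have := List.dropWhile_eq_nil_iff.1 h c0 hc0m
    rw [hzl] at this
    simp at this
    exact hc0 this
  have hstrip_dig : PySem.Chars.strIsdigit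
      (value.toList.dropWhile (fun c => ("0".toList).contains c)) = true := by
    unfold PySem.Chars.strIsdigit
    rw [Bool.and_eq_true]
    refine ⟨by simpa using hstrip_ne, ?_⟩
    rw [List.all_eq_true]
    intro c hc
    have hcm : c ∈ value.toList := (List.dropWhile_sublist _).mem hc
    have ⟨h1, h2⟩ := hdig c hcm
    unfold PySem.Chars.isdigit
    rw [Bool.and_eq_true]
    unfold Char.toNat at h1 h2
    have e0 : ('0':Char).val.toNat = 48 := rfl
    have e9 : ('9':Char).val.toNat = 57 := rfl
    refine ⟨decide_eq_true ?_, decide_eq_true ?_⟩ <;>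
      (rw [Char.le_def, UInt32.le_iff_toNat_le]; omega)
  simp only [hempty, hall, hstrip_dig, Bool.not_true, Bool.false_eq_true, if_false, if_true]
  cases hof : PySem.Int.ofStr? value with
  | none => rfl
  | some v =>
    by_cases hv : v = 0
    · subst hv; simp
    · simp [hv]
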